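-- pv_equiv track=rewrite | github.com/eliottcassidy2000/math | 04-computation/ehrhart_independence_test.py | compute_independence_polynomial
-- ===== SOURCE A (Python) =====
-- def compute_independence_polynomial(cycles_with_counts, x_val):
--     """Compute I(Omega, x) at integer x value.
--
--     I(Omega, x) = sum over independent sets S of x^|S|
--     where each vertex set contributes its directed cycle count to the multiplicity.
--     """
--     vs_list = [(vs, cnt) for vs, cnt in cycles_with_counts]
--     n_groups = len(vs_list)
--
--     if n_groups == 0:
--         return 1
--
--     # Enumerate all independent sets (vertex-disjoint cycle collections)
--     # For small n_groups, brute force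
--     if n_groups > 20:
--         # Use alpha coefficients instead
--         return None
--
--     total = 0
--     for mask in range(1 << n_groups):
--         selected = [i for i in range(n_groups) if mask & (1 << i)]
--         # Check pairwise disjointness
--         is_independent = True
--         for i in range(len(selected)):
--             for j in range(i+1, len(selected)):
--                 if vs_list[selected[i]][0] & vs_list[selected[j]][0]:
--                     is_independent = False
--                     break
--             if not is_independent:
--                 break
--         if is_independent:
--             k = len(selected)
--             # Product of counts (choosing one directed cycle from each vertex set)
--             product = 1
--             for i in selected:
--                 product *= vs_list[i][1]
--             total += product * (x_val ** k)
--     return total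
-- ===== SOURCE B (Python) =====
-- def compute_independence_polynomial(cycles_with_counts, x_val):
--     """Compute I(Omega, x) at integer x value.
--
--     Branch-and-prune recursion over the groups: either skip the first group or
--     take it (only if its vertex set is disjoint from every set chosen so far),
--     so non-independent subsets are abandoned at the first conflict instead of
--     being enumerated and re-checked pairwise.
--     """
--     groups = [(vs, cnt) for vs, cnt in cycles_with_counts]
--     if len(groups) > 20:
--         # Use alpha coefficients instead
--         return None
--
--     def go(groups, chosen):
--         if not groups:
--             return 1
--         vs, cnt = groups[0]
--         rest = groups[1:]
--         res = go(rest, chosen)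
--         if all(vs & c == 0 for c in chosen):
--             res += cnt * x_val * go(rest, chosen + [vs])
--         return res
--
--     return go(groups, [])
-- ===== Notes on version B (the rewrite author's own statement) =====
-- stated objective: faster
-- what changed: Replaces A's enumeration of all 2^n masks (rebuilding the selected index list and re-checking pairwise disjointness per mask) with a skip/take branch-and-prune recursion over the groups that extends only independent partial selections, abandoning a subtree at the first conflict.
import Mathlib
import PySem

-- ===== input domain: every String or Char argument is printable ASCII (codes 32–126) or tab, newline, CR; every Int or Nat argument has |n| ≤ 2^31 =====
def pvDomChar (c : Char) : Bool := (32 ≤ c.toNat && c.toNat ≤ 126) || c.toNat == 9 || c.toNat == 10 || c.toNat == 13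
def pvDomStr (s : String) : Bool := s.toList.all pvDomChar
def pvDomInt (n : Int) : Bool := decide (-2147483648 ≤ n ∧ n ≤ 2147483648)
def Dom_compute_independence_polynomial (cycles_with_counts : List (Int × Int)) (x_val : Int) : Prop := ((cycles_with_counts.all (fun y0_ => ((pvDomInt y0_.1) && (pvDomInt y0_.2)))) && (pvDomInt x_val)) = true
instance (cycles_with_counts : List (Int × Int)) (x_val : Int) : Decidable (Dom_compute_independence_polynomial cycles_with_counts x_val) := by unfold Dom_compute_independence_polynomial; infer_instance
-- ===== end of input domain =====

-- B replaces A's enumeration of all 2^n masks (with a quadratic pairwise re-check per mask) by a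
-- skip/take recursion over the groups that prunes at the first conflict; equivalence of the return
-- value is proved on all inputs.

-- ===== PORT A =====
-- the nested pairwise loop with its two `break`s: outer loop = recursion on the suffix of
-- `selected`, inner loop with break = List.any (stops at the first conflict, like the break)
def pvIndepA (vl : List (Int × Int)) : List Int → Bool
  | [] => true
  | i :: rest =>
      if rest.any (fun j => !(PySem.Int.band (vl.getD i.toNat (0, 0)).1 (vl.getD j.toNat (0, 0)).1 == 0)) then
        false
      else pvIndepA vl rest

def compute_independence_polynomial (cycles_with_counts : List (Int × Int)) (x_val : Int) : Option Int :=
  let vs_list := cycles_with_counts.map (fun vc => (vc.1, vc.2))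
  let n_groups : Int := vs_list.length
  if n_groups = 0 then some 1
  else if n_groups > 20 then none
  else
    -- range(1 << n_groups): the shift amount is n_groups = len(vs_list) ≥ 0, so a Nat shift is exact
    some ((PySem.List.pyRange 0 ((1 : Int) <<< vs_list.length)).foldl (fun total mask =>
      -- selected = [i for i in range(n_groups) if mask & (1 << i)]; i ≥ 0 in the range so i.toNat is exact
      let selected := (PySem.List.pyRange 0 n_groups).filter
        (fun i => !(PySem.Int.band mask ((1 : Int) <<< i.toNat) == 0))
      if pvIndepA vs_list selected then
        -- indices in `selected` come from range(len(vs_list)), so getD is Python's exact indexing here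
        total + (selected.foldl (fun p i => p * (vs_list.getD i.toNat (0, 0)).2) 1) * x_val ^ selected.length
      else total) 0)

-- ===== PORT B =====
def pvGoB (x : Int) : List (Int × Int) → List Int → Int
  | [], _ => 1
  | (vs, cnt) :: rest, chosen =>
      let res := pvGoB x rest chosen
      if chosen.all (fun c => PySem.Int.band vs c == 0) then
        res + cnt * x * pvGoB x rest (chosen ++ [vs])
      else res

def compute_independence_polynomial_alt (cycles_with_counts : List (Int × Int)) (x_val : Int) : Option Int :=
  let groups := cycles_with_counts.map (fun vc => (vc.1, vc.2))
  if groups.length > 20 then none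
  else some (pvGoB x_val groups [])

-- ===== PRECONDITION & SPEC =====
def Spec_compute_independence_polynomial (cycles_with_counts : List (Int × Int)) (x_val : Int) (out : Option Int) : Prop := out = compute_independence_polynomial_alt cycles_with_counts x_val
instance (cycles_with_counts : List (Int × Int)) (x_val : Int) (out : Option Int) : Decidable (Spec_compute_independence_polynomial cycles_with_counts x_val out) := by unfold Spec_compute_independence_polynomial; infer_instance

-- ===== CLAIM (what is proved, stated in full; the proofs are below) =====
def Claim_equal_compute_independence_polynomial : Prop := ∀ (cycles_with_counts : List (Int × Int)) (x_val : Int), Dom_compute_independence_polynomial cycles_with_counts x_val → Spec_compute_independence_polynomial cycles_with_counts x_val (compute_independence_polynomial cycles_with_counts x_val)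

-- ===== LEMMAS AND PROOFS =====

-- the sub-multiset of groups selected by the bits of m (bit 0 = head)
def pvChosen : List (Int × Int) → Nat → List (Int × Int)
  | [], _ => []
  | v :: rest, m => if m % 2 = 1 then v :: pvChosen rest (m / 2) else pvChosen rest (m / 2)

-- pairwise disjointness of a list of groups (first-against-later, like A's i<j loop)
def pvPairB : List (Int × Int) → Bool
  | [] => true
  | v :: rest => rest.all (fun w => PySem.Int.band v.1 w.1 == 0) && pvPairB rest

-- A's contribution of mask m, written over the chosen sublist
def pvTA (x : Int) (vs : List (Int × Int)) (m : Nat) : Int :=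
  if pvPairB (pvChosen vs m) then ((pvChosen vs m).map Prod.snd).prod * x ^ (pvChosen vs m).length else 0

-- B's per-mask contribution relative to an accumulator `chosen`
def pvF (x : Int) : List (Int × Int) → List Int → Nat → Int
  | [], _, _ => 1
  | (v, c) :: rest, ch, m =>
      if m % 2 = 1 then
        if ch.all (fun w => PySem.Int.band v w == 0) then c * x * pvF x rest (ch ++ [v]) (m / 2) else 0
      else pvF x rest ch (m / 2)

theorem pv_all_and {α : Type} (l : List α) (p q : α → Bool) :
    (l.all fun a => p a && q a) = (l.all p && l.all q) := by
  induction l with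
  | nil => rfl
  | cons a t ih => cases hp : p a <;> cases hq : q a <;> simp [hp, hq, ih]

theorem pv_sum_range_double (f : Nat → Int) (k : Nat) :
    ((List.range (2 * k)).map f).sum = ((List.range k).map (fun m => f (2 * m) + f (2 * m + 1))).sum := by
  induction k with
  | zero => simp
  | succ k ih =>
      have h : 2 * (k + 1) = (2 * k + 1) + 1 := by omega
      rw [h, List.range_succ, List.range_succ, List.range_succ]
      simp [ih]

theorem pvGoB_eq_sum (x : Int) (vs : List (Int × Int)) (ch : List Int) :
    pvGoB x vs ch = ((List.range (2 ^ vs.length)).map (pvF x vs ch)).sum := by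
  induction vs generalizing ch with
  | nil => simp [pvGoB, pvF]
  | cons v rest ih =>
      obtain ⟨vv, vc⟩ := v
      have hpow : 2 ^ (rest.length + 1) = 2 * 2 ^ rest.length := by ring
      rw [List.length_cons, hpow, pv_sum_range_double]
      have heven : ∀ m : Nat, pvF x ((vv, vc) :: rest) ch (2 * m) = pvF x rest ch m := by
        intro m
        simp [pvF, Nat.mul_mod_right, Nat.mul_div_cancel_left m (by omega : 0 < 2)]
      have hodd : ∀ m : Nat, pvF x ((vv, vc) :: rest) ch (2 * m + 1) =
          if ch.all (fun w => PySem.Int.band vv w == 0) then vc * x * pvF x rest (ch ++ [vv]) m else 0 := by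
        intro m
        have h1 : (2 * m + 1) % 2 = 1 := by omega
        have h2 : (2 * m + 1) / 2 = m := by omega
        simp [pvF, h1, h2]
      calc pvGoB x ((vv, vc) :: rest) ch
          = pvGoB x rest ch + (if ch.all (fun w => PySem.Int.band vv w == 0) then
              vc * x * pvGoB x rest (ch ++ [vv]) else 0) := by
            simp only [pvGoB]; split <;> simp
        _ = ((List.range (2 ^ rest.length)).map
              (fun m => pvF x ((vv, vc) :: rest) ch (2 * m) + pvF x ((vv, vc) :: rest) ch (2 * m + 1))).sum := by
            simp only [heven, hodd]
            rw [PySem.List.sum_map_add_int]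
            congr 1
            · rw [ih]
            · split
              · rw [ih, List.sum_map_mul_left]
              · simp

-- B's per-mask contribution = (compatibility of the chosen sublist with `ch`) gated A-contribution
theorem pvF_eq_TA (x : Int) (vs : List (Int × Int)) (ch : List Int) (m : Nat) :
    pvF x vs ch m =
      if (pvChosen vs m).all (fun t => ch.all (fun c => PySem.Int.band t.1 c == 0)) then pvTA x vs m else 0 := by
  induction vs generalizing ch m with
  | nil => simp [pvF, pvChosen, pvTA, pvPairB]
  | cons v rest ih =>
      obtain ⟨vv, vc⟩ := v
      by_cases hm : m % 2 = 1
      · have hch : pvChosen ((vv, vc) :: rest) m = (vv, vc) :: pvChosen rest (m / 2) := by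
          simp [pvChosen, hm]
        have hsplit : ((pvChosen rest (m / 2)).all fun t => (ch ++ [vv]).all fun c => PySem.Int.band t.1 c == 0)
            = (((pvChosen rest (m / 2)).all fun t => ch.all fun c => PySem.Int.band t.1 c == 0) &&
               ((pvChosen rest (m / 2)).all fun t => PySem.Int.band t.1 vv == 0)) := by
          simp only [List.all_append, List.all_cons, List.all_nil, Bool.and_true]
          exact pv_all_and _ _ _
        have hsym : ((pvChosen rest (m / 2)).all fun w => PySem.Int.band vv w.1 == 0)
            = ((pvChosen rest (m / 2)).all fun t => PySem.Int.band t.1 vv == 0) := by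
          simp only [PySem.Int.band_comm vv]
        simp only [pvF, hm, hch, pvTA, pvPairB, ih, hsplit, hsym, List.all_cons, List.map_cons,
          List.prod_cons, List.length_cons, if_pos]
        by_cases h0 : (ch.all fun c => PySem.Int.band vv c == 0) <;>
          by_cases h1 : ((pvChosen rest (m / 2)).all fun t => ch.all fun c => PySem.Int.band t.1 c == 0) <;>
            by_cases h2 : ((pvChosen rest (m / 2)).all fun t => PySem.Int.band t.1 vv == 0) <;>
              by_cases hp : (pvPairB (pvChosen rest (m / 2)) = true) <;>
                (simp [h0, h1, h2, hp, pow_succ]; try ring)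
      · have hm0 : m % 2 = 0 := by omega
        have hch : pvChosen ((vv, vc) :: rest) m = pvChosen rest (m / 2) := by
          simp [pvChosen, hm]
        simp only [pvF, hm0, hch, pvTA, ih]
        simp

-- the selected indices of mask m, mapped through indexing, are exactly pvChosen
theorem pv_sel_map (vs : List (Int × Int)) (m : Nat) :
    ((List.range vs.length).filter (fun i => m.testBit i)).map (fun i => vs.getD i (0, 0)) = pvChosen vs m := by
  induction vs generalizing m with
  | nil => simp [pvChosen]
  | cons v rest ih =>
      rw [List.length_cons, List.range_succ_eq_map]
      have hfm : ((List.range rest.length).map Nat.succ).filter (fun i => m.testBit i)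
          = ((List.range rest.length).filter (fun i => (m / 2).testBit i)).map Nat.succ := by
        rw [List.filter_map]
        refine congrArg (List.map Nat.succ) ?_
        apply List.filter_congr
        intro i _
        simp [Function.comp, Nat.testBit_succ]
      have hrest : (((List.range rest.length).map Nat.succ).filter (fun i => m.testBit i)).map
          (fun i => (v :: rest).getD i (0, 0)) = pvChosen rest (m / 2) := by
        rw [hfm, List.map_map]
        have h2 : ((fun i => (v :: rest).getD i (0, 0)) ∘ Nat.succ) = (fun i => rest.getD i (0, 0)) := by
          funext i
          simp
        rw [h2, ih]
      by_cases hm : m % 2 = 1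
      · have hb : m.testBit 0 = true := by simp [Nat.testBit_zero, hm]
        rw [List.filter_cons, if_pos hb, List.map_cons, hrest]
        simp [pvChosen, hm]
      · have hb : m.testBit 0 = false := by simp [Nat.testBit_zero, hm]
        rw [List.filter_cons, if_neg (by simp [hb]), hrest]
        simp [pvChosen, hm]

theorem pvIndepA_cons (vl : List (Int × Int)) (a : Int) (l : List Int) :
    pvIndepA vl (a :: l) = if l.any (fun j => !(PySem.Int.band (vl.getD a.toNat (0, 0)).1
      (vl.getD j.toNat (0, 0)).1 == 0)) then false else pvIndepA vl l := rfl

theorem pvPairB_cons (v : Int × Int) (l : List (Int × Int)) :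
    pvPairB (v :: l) = ((l.all fun w => PySem.Int.band v.1 w.1 == 0) && pvPairB l) := rfl

-- A's break-structured pairwise loop over indices = pvPairB over the indexed groups
theorem pvIndepA_eq_pairB (vl : List (Int × Int)) (sel : List Nat) :
    pvIndepA vl (sel.map (Nat.cast : Nat → Int)) = pvPairB (sel.map (fun i => vl.getD i (0, 0))) := by
  induction sel with
  | nil => rfl
  | cons i rest ih =>
      rw [List.map_cons, List.map_cons, pvIndepA_cons, pvPairB_cons, List.any_map, List.all_map, ih]
      simp only [Function.comp_def, Int.toNat_natCast]
      rcases hall : rest.all (fun j => PySem.Int.band (vl.getD i (0, 0)).1 (vl.getD j (0, 0)).1 == 0) with _ | _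
      · obtain ⟨j, hj, hjp⟩ := List.all_eq_false.mp hall
        rw [if_pos (List.any_eq_true.mpr ⟨j, hj, by simpa using hjp⟩), Bool.false_and]
      · have hno : ¬ (rest.any (fun j =>
            !(PySem.Int.band (vl.getD i (0, 0)).1 (vl.getD j (0, 0)).1 == 0)) = true) := by
          intro hAny
          obtain ⟨j, hj, hjp⟩ := List.any_eq_true.mp hAny
          have hb := List.all_eq_true.mp hall j hj
          rw [hb] at hjp
          simp at hjp
        rw [if_neg hno, Bool.true_and]

theorem pv_selected_eq (vs : List (Int × Int)) (m : Nat) :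
    ((PySem.List.pyRange 0 (vs.length : Int)).filter
        (fun i => !(PySem.Int.band (m : Int) ((1 : Int) <<< i.toNat) == 0))) =
      ((List.range vs.length).filter (fun i => m.testBit i)).map (Nat.cast : Nat → Int) := by
  rw [PySem.List.pyRange_zero_natCast, List.filter_map]
  refine congrArg (List.map (Nat.cast : Nat → Int)) ?_
  apply List.filter_congr
  intro i _
  simp only [Function.comp_apply, Int.toNat_natCast]
  rw [Int.shiftLeft_natCast_right]
  have hshift : ((1 : Int) <<< i) = (((1 <<< i : Nat) : Nat) : Int) := by
    rw [Int.shiftLeft_eq, Nat.shiftLeft_eq]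
    push_cast
    ring
  rw [hshift, PySem.Int.band_natCast]
  have hand : m &&& (1 <<< i) = (m.testBit i).toNat * 2 ^ i := by
    rw [Nat.shiftLeft_eq, one_mul, Nat.and_two_pow]
  rw [hand]
  cases h : m.testBit i <;> simp

-- main sum identity: A's fold over all masks = B's recursion
theorem pv_main (vs : List (Int × Int)) (x : Int) :
    (PySem.List.pyRange 0 ((1 : Int) <<< vs.length)).foldl (fun total mask =>
      let selected := (PySem.List.pyRange 0 (vs.length : Int)).filter
        (fun i => !(PySem.Int.band mask ((1 : Int) <<< i.toNat) == 0))
      if pvIndepA vs selected then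
        total + (selected.foldl (fun p i => p * (vs.getD i.toNat (0, 0)).2) 1) * x ^ selected.length
      else total) 0 = pvGoB x vs [] := by
  have hone : ((1 : Int) <<< vs.length) = ((2 ^ vs.length : Nat) : Int) := by
    rw [Int.shiftLeft_eq]; push_cast; ring
  rw [hone, PySem.List.pyRange_zero_natCast (2 ^ vs.length)]
  generalize hFdef : (fun (total : Int) (mask : Int) =>
      let selected := (PySem.List.pyRange 0 (vs.length : Int)).filter
        (fun i => !(PySem.Int.band mask ((1 : Int) <<< i.toNat) == 0))
      if pvIndepA vs selected then
        total + (selected.foldl (fun p i => p * (vs.getD i.toNat (0, 0)).2) 1) * x ^ selected.length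
      else total) = F
  rw [List.foldl_map]
  have hterm : ∀ (total : Int) (m : Nat), F total ((m : Nat) : Int) = total + pvTA x vs m := by
    intro total m
    rw [← hFdef]
    simp only
    rw [pv_selected_eq]
    have hindep : pvIndepA vs (((List.range vs.length).filter (fun i => m.testBit i)).map
        (Nat.cast : Nat → Int)) = pvPairB (pvChosen vs m) := by
      rw [pvIndepA_eq_pairB, pv_sel_map]
    have hprod : (((List.range vs.length).filter (fun i => m.testBit i)).map
          (Nat.cast : Nat → Int)).foldl (fun p i => p * (vs.getD i.toNat (0, 0)).2) 1
        = ((pvChosen vs m).map Prod.snd).prod := by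
      rw [List.foldl_map, ← pv_sel_map vs m, List.map_map, List.prod_eq_foldl, List.foldl_map]
      rfl
    have hlen : (((List.range vs.length).filter (fun i => m.testBit i)).map
        (Nat.cast : Nat → Int)).length = (pvChosen vs m).length := by
      rw [List.length_map, ← pv_sel_map vs m, List.length_map]
    rw [hindep, hprod, hlen]
    unfold pvTA
    split <;> simp
  have hfun : (fun (xx : Int) (yy : Nat) => F xx ((fun k : Nat => (k : Int)) yy))
      = (fun (xx : Int) (yy : Nat) => xx + pvTA x vs yy) := by
    funext xx yy
    exact hterm xx yy
  rw [hfun, PySem.List.foldl_add]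
  have hFT : (List.range (2 ^ vs.length)).map (pvTA x vs) = (List.range (2 ^ vs.length)).map (pvF x vs []) := by
    apply List.map_congr_left
    intro mm _
    rw [pvF_eq_TA]
    simp
  rw [zero_add, hFT, pvGoB_eq_sum]

-- ===== VERDICT (by name: the statement is the Claim_ definition above) =====
theorem compute_independence_polynomial_spec : Claim_equal_compute_independence_polynomial := by
  intro cwc x _
  unfold Spec_compute_independence_polynomial
  unfold compute_independence_polynomial compute_independence_polynomial_alt
  have heta : cwc.map (fun vc => (vc.1, vc.2)) = cwc := by simp
  rw [heta]
  cases cwc with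
  | nil => simp [pvGoB]
  | cons a t =>
      rw [if_neg (by simp only [List.length_cons]; push_cast; omega)]
      by_cases h20 : ((a :: t).length : Int) > 20
      · rw [if_pos h20, if_pos (by exact_mod_cast h20)]
      · rw [if_neg h20, if_neg (fun h => h20 (by exact_mod_cast h)), pv_main]
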